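-- pv_equiv track=rewrite | github.com/DataJunction/dj | datajunction-server/datajunction_server/naming.py | amenable_name
-- ===== SOURCE A (Python) =====
-- from string import ascii_letters, digits
-- from typing import Any, Iterable, List
--
-- ACCEPTABLE_CHARS = set(ascii_letters + digits + "_")
--
-- LOOKUP_CHARS = {
--     ".": "DOT",
--     "'": "QUOTE",
--     '"': "DQUOTE",
--     "`": "BTICK",
--     "!": "EXCL",
--     "@": "AT",
--     "#": "HASH",
--     "$": "DOLLAR",
--     "%": "PERC",
--     "^": "CARAT",
--     "&": "AMP",
--     "*": "STAR",
--     "(": "LPAREN",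
--     ")": "RPAREN",
--     "[": "LBRACK",
--     "]": "RBRACK",
--     "-": "MINUS",
--     "+": "PLUS",
--     "=": "EQ",
--     "/": "FSLSH",
--     "\\": "BSLSH",
--     "|": "PIPE",
--     "~": "TILDE",
--     ">": "GT",
--     "<": "LT",
-- }
--
-- def amenable_name(name: str) -> str:
--     """Takes a string and makes it have only alphanumerics"""
--     ret: List[str] = []
--     cont: List[str] = []
--     for char in name:
--         if char in ACCEPTABLE_CHARS:
--             cont.append(char)
--         else:
--             ret.append("".join(cont))
--             ret.append(LOOKUP_CHARS.get(char, "UNK"))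
--             cont = []
--
--     return ("_".join(ret) + "_" + "".join(cont)).strip("_")
-- ===== SOURCE B (Python) =====
-- from string import ascii_letters, digits
--
-- WORD_CHARS = ascii_letters + digits + "_"
-- SYMBOL_KEYS = ".'\"`!@#$%^&*()[]-+=/\\|~><"
-- SYMBOL_NAMES = [
--     "DOT", "QUOTE", "DQUOTE", "BTICK", "EXCL", "AT", "HASH", "DOLLAR",
--     "PERC", "CARAT", "AMP", "STAR", "LPAREN", "RPAREN", "LBRACK", "RBRACK",
--     "MINUS", "PLUS", "EQ", "FSLSH", "BSLSH", "PIPE", "TILDE", "GT", "LT",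
-- ]
-- SYMBOLS = dict(zip(SYMBOL_KEYS, SYMBOL_NAMES))
--
-- def amenable_name(name: str) -> str:
--     """Takes a string and makes it have only alphanumerics"""
--     return "".join(
--         c if c in WORD_CHARS else "_" + SYMBOLS.get(c, "UNK") + "_" for c in name
--     ).strip("_")
-- ===== Notes on version B (the rewrite author's own statement) =====
-- stated objective: simpler
-- what changed: Replaces A's two-buffer state machine (ret/cont with flushes, '_'.join plus a trailing run) by a stateless per-character token map -- the char itself, or its symbol name wrapped in underscores, looked up in a dict zipped from two parallel literals -- concatenated and stripped of underscores.
import Mathlib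
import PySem

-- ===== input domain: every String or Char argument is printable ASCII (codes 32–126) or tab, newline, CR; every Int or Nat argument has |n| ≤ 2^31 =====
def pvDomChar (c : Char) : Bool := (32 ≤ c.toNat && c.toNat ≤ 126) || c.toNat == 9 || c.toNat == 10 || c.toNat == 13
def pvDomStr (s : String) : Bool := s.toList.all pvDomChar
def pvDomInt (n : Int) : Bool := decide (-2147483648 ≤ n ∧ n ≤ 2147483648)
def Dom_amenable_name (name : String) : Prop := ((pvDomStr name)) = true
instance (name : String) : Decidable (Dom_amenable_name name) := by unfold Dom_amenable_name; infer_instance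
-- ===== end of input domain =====

-- B replaces A's two-buffer state machine by a stateless per-character token map (char, or its
-- symbol name wrapped in underscores, looked up in a dict zipped from two parallel literals),
-- concatenated and stripped of underscores (objective: simpler).

-- ===== PORT A =====
-- module constant ACCEPTABLE_CHARS = set(ascii_letters + digits + "_")
def pvAcceptable : PySem.Set Char :=
  PySem.Set.ofList ("abcdefghijklmnopqrstuvwxyzABCDEFGHIJKLMNOPQRSTUVWXYZ0123456789_".toList)

-- module constant LOOKUP_CHARS = {".": "DOT", …}
def pvLookup : PySem.Dict Char (List Char) := PySem.Dict.ofList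
  [('.', "DOT".toList), ('\'', "QUOTE".toList), ('"', "DQUOTE".toList), ('`', "BTICK".toList),
   ('!', "EXCL".toList), ('@', "AT".toList), ('#', "HASH".toList), ('$', "DOLLAR".toList),
   ('%', "PERC".toList), ('^', "CARAT".toList), ('&', "AMP".toList), ('*', "STAR".toList),
   ('(', "LPAREN".toList), (')', "RPAREN".toList), ('[', "LBRACK".toList), (']', "RBRACK".toList),
   ('-', "MINUS".toList), ('+', "PLUS".toList), ('=', "EQ".toList), ('/', "FSLSH".toList),
   ('\\', "BSLSH".toList), ('|', "PIPE".toList), ('~', "TILDE".toList), ('>', "GT".toList),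
   ('<', "LT".toList)]

-- loop body of A: cont.append(char) / ret.append("".join(cont)); ret.append(lookup); cont = []
def pvStepA (st : List (List Char) × List Char) (c : Char) : List (List Char) × List Char :=
  if (pvAcceptable.contains c) then (st.1, st.2 ++ [c])
  else (st.1 ++ [st.2] ++ [pvLookup.getD c "UNK".toList], ([] : List Char))

-- ("_".join(ret) + "_" + "".join(cont))
def pvG (st : List (List Char) × List Char) : List Char :=
  PySem.Chars.join ['_'] st.1 ++ '_' :: st.2

def amenable_name (name : String) : String :=
  String.ofList (PySem.Chars.stripChars (pvG (name.toList.foldl pvStepA ([], []))) ['_'])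

-- ===== PORT B =====
-- B's module constants: WORD_CHARS string, SYMBOLS = dict(zip(SYMBOL_KEYS, SYMBOL_NAMES))
def pvWordChars : List Char :=
  "abcdefghijklmnopqrstuvwxyzABCDEFGHIJKLMNOPQRSTUVWXYZ0123456789_".toList

def pvSymKeys : List Char := ".'\"`!@#$%^&*()[]-+=/\\|~><".toList

def pvSymNames : List (List Char) :=
  ["DOT".toList, "QUOTE".toList, "DQUOTE".toList, "BTICK".toList, "EXCL".toList, "AT".toList,
   "HASH".toList, "DOLLAR".toList, "PERC".toList, "CARAT".toList, "AMP".toList, "STAR".toList,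
   "LPAREN".toList, "RPAREN".toList, "LBRACK".toList, "RBRACK".toList, "MINUS".toList,
   "PLUS".toList, "EQ".toList, "FSLSH".toList, "BSLSH".toList, "PIPE".toList, "TILDE".toList,
   "GT".toList, "LT".toList]

def pvSymbols : PySem.Dict Char (List Char) := PySem.Dict.ofList (pvSymKeys.zip pvSymNames)

-- one token per character: 'c if c in WORD_CHARS else "_" + SYMBOLS.get(c, "UNK") + "_"'
-- ('c in WORD_CHARS' on a 1-char c is substring membership = PySem.Chars.isIn [c])
def pvTokB (c : Char) : List Char :=
  if PySem.Chars.isIn [c] pvWordChars then [c]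
  else '_' :: pvSymbols.getD c "UNK".toList ++ ['_']

def amenable_name_alt (name : String) : String :=
  String.ofList (PySem.Chars.stripChars ((name.toList.map pvTokB).flatten) ['_'])

-- ===== PRECONDITION & SPEC =====
def Spec_amenable_name (name : String) (out : String) : Prop := out = amenable_name_alt name
instance (name : String) (out : String) : Decidable (Spec_amenable_name name out) := by unfold Spec_amenable_name; infer_instance

-- ===== CLAIM =====
def Claim_equal_amenable_name : Prop := ∀ (name : String), Dom_amenable_name name → Spec_amenable_name name (amenable_name name)

-- ===== LEMMAS AND PROOFS =====

-- B's zipped dict is A's literal dict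
theorem pv_symbols_eq : pvSymbols = pvLookup := by decide

-- B's membership test agrees with A's set test
theorem pv_guard_eq (c : Char) :
    PySem.Chars.isIn [c] pvWordChars = pvAcceptable.contains c := by
  have h1 : PySem.Chars.isIn [c] pvWordChars = true ↔ c ∈ pvWordChars := by
    rw [PySem.Chars.isIn_iff_infix]
    constructor
    · rintro ⟨s, t, h⟩; rw [← h]; simp
    · intro h
      rcases List.append_of_mem h with ⟨s, t, hst⟩
      exact ⟨s, t, by rw [hst]; simp⟩
  have h2 : pvAcceptable.contains c = true ↔ c ∈ pvWordChars := by
    rw [PySem.Set.contains_iff, show pvAcceptable = PySem.Set.ofList pvWordChars from rfl]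
    exact PySem.Set.mem_ofList _ _
  rw [Bool.eq_iff_iff, h1, h2]

-- token unfolding at a decided guard
theorem pv_tok_pos (c : Char) (hc : pvAcceptable.contains c = true) : pvTokB c = [c] := by
  simp only [pvTokB, pv_guard_eq, if_pos hc]

theorem pv_tok_neg (c : Char) (hc : ¬ pvAcceptable.contains c = true) :
    pvTokB c = '_' :: pvLookup.getD c "UNK".toList ++ ['_'] := by
  simp only [pvTokB, pv_guard_eq, pv_symbols_eq, if_neg hc]

-- step unfolding at a decided guard
theorem pv_stepA_pos (st : List (List Char) × List Char) (c : Char)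
    (hc : pvAcceptable.contains c = true) : pvStepA st c = (st.1, st.2 ++ [c]) := by
  simp only [pvStepA, if_pos hc]

theorem pv_stepA_neg (st : List (List Char) × List Char) (c : Char)
    (hc : ¬ pvAcceptable.contains c = true) :
    pvStepA st c = (st.1 ++ [st.2] ++ [pvLookup.getD c "UNK".toList], []) := by
  simp only [pvStepA, if_neg hc]

-- "_".join over an appended element, for nonempty prefix
theorem pv_join_us_append (l : List (List Char)) (x : List Char) (h : l ≠ []) :
    PySem.Chars.join ['_'] (l ++ [x]) = PySem.Chars.join ['_'] l ++ '_' :: x := by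
  induction l with
  | nil => exact absurd rfl h
  | cons a t ih =>
    cases t with
    | nil => simp [PySem.Chars.join, List.intercalate, List.intersperse]
    | cons b t' =>
      have := ih (by simp)
      simp only [PySem.Chars.join, List.intercalate] at this ⊢
      simp [List.intersperse, List.flatten] at this ⊢
      simp [this]

-- "_".join [a, b] spelled out
theorem pv_join_us_pair (a b : List Char) :
    PySem.Chars.join ['_'] [a, b] = a ++ '_' :: b := by
  simp [PySem.Chars.join, List.intercalate, List.intersperse]

-- .strip("_") ignores a leading underscore
theorem pv_strip_us_cons (x : List Char) :
    PySem.Chars.stripChars ('_' :: x) ['_'] = PySem.Chars.stripChars x ['_'] := by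
  simp [PySem.Chars.stripChars, List.dropWhile]

-- once ret is nonempty, A's joined state simply accumulates B's tokens
theorem pv_loopA (cs : List Char) : ∀ (ret : List (List Char)) (cont : List Char), ret ≠ [] →
    pvG (cs.foldl pvStepA (ret, cont)) = pvG (ret, cont) ++ (cs.map pvTokB).flatten := by
  induction cs with
  | nil => intro ret cont _; simp
  | cons c cs ih =>
    intro ret cont h
    rw [List.foldl_cons, List.map_cons, List.flatten_cons]
    by_cases hc : pvAcceptable.contains c = true
    · rw [pv_stepA_pos _ _ hc, pv_tok_pos _ hc, ih ret (cont ++ [c]) h]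
      simp [pvG]
    · rw [pv_stepA_neg _ _ hc, pv_tok_neg _ hc]
      rw [ih _ [] (by simp)]
      simp only [pvG, ← List.append_assoc]
      rw [pv_join_us_append (ret ++ [cont]) _ (by simp), pv_join_us_append ret _ h]

-- from the initial state, A's joined state is B's token string, possibly with one leading '_'
theorem pv_loopB (cs : List Char) : ∀ (cont : List Char),
    pvG (cs.foldl pvStepA ([], cont)) = '_' :: (cont ++ (cs.map pvTokB).flatten) ∨
    pvG (cs.foldl pvStepA ([], cont)) = cont ++ (cs.map pvTokB).flatten := by
  induction cs with
  | nil => intro cont; left; simp [pvG, PySem.Chars.join, List.intercalate]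
  | cons c cs ih =>
    intro cont
    rw [List.foldl_cons, List.map_cons, List.flatten_cons]
    by_cases hc : pvAcceptable.contains c = true
    · rw [pv_stepA_pos _ _ hc, pv_tok_pos _ hc]
      rcases ih (cont ++ [c]) with h | h
      · left; rw [h]; simp
      · right; rw [h]; simp
    · right
      rw [pv_stepA_neg _ _ hc, pv_tok_neg _ hc]
      have := pv_loopA cs ([] ++ [cont] ++ [pvLookup.getD c "UNK".toList]) [] (by simp)
      rw [this]
      simp [pvG, pv_join_us_pair]

-- ===== VERDICT =====
theorem amenable_name_spec : Claim_equal_amenable_name := by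
  intro name _
  unfold Spec_amenable_name amenable_name amenable_name_alt
  rcases pv_loopB name.toList [] with h | h <;> simp only [List.nil_append] at h <;> rw [h]
  · rw [pv_strip_us_cons]
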